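-- pv_equiv track=rewrite | github.com/jSebastianAR/tt-preprocesing | NLP/using_nltk.py | search4last_verb
-- ===== SOURCE A (Python) =====
-- def search4last_verb(pos_tagged):
--
-- 	nouns_list = []
-- 	flag = False
-- 	for tag_tuple in pos_tagged: #Busca en cada tag
--
-- 		if tag_tuple[1] == 'VERB': #Si es un verbo
-- 			flag = True #activa la bandera
--
-- 		if flag == True and tag_tuple[1] == 'NOUN': #busca un sustantivo después de un verbo
-- 			nouns_list.append(tag_tuple)
--
-- 	return nouns_list
-- ===== SOURCE B (Python) =====
-- def search4last_verb(pos_tagged):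
--     # locate the first verb, then filter nouns from that suffix
--     idx = next((i for i, t in enumerate(pos_tagged) if t[1] == 'VERB'), None)
--     if idx is None:
--         return []
--     return [t for t in pos_tagged[idx:] if t[1] == 'NOUN']
-- ===== Notes on version B (the rewrite author's own statement) =====
-- stated objective: alternative
-- what changed: Replaces A's single flag-latched scan with a locate-first-verb-index search followed by a noun filter over the suffix slice.
import Mathlib
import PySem

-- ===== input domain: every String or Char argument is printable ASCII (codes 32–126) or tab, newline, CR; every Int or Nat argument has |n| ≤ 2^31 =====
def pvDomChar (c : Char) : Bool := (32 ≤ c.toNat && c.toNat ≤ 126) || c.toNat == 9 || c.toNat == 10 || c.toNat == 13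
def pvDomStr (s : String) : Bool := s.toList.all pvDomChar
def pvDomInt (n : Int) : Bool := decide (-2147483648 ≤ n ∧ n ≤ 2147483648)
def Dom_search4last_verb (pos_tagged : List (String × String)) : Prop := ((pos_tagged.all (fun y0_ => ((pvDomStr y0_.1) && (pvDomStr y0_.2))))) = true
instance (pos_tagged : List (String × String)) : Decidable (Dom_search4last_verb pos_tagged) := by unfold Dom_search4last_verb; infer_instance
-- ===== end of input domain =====

-- B replaces A's flag-latched scan with locate-first-verb then filter-the-suffix (objective: alternative decomposition).

-- ===== PORT A =====
-- A's loop: latch flag on the first 'VERB' tag, append 'NOUN' tuples once latched.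
def search4last_verb (pos_tagged : List (String × String)) : List (String × String) :=
  (pos_tagged.foldl
    (fun (st : List (String × String) × Bool) tag_tuple =>
      let flag := if tag_tuple.2 == "VERB" then true else st.2
      let nouns_list := if flag && (tag_tuple.2 == "NOUN") then st.1 ++ [tag_tuple] else st.1
      (nouns_list, flag))
    ([], false)).1

-- ===== PORT B =====
-- B: drop the prefix before the first 'VERB' (the index search), then filter 'NOUN' tuples from the suffix.
def search4last_verb_alt (pos_tagged : List (String × String)) : List (String × String) :=
  (pos_tagged.dropWhile (fun t => t.2 != "VERB")).filter (fun t => t.2 == "NOUN")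

-- ===== PRECONDITION & SPEC =====
def Spec_search4last_verb (pos_tagged : List (String × String)) (out : List (String × String)) : Prop := out = search4last_verb_alt pos_tagged
instance (pos_tagged : List (String × String)) (out : List (String × String)) : Decidable (Spec_search4last_verb pos_tagged out) := by unfold Spec_search4last_verb; infer_instance

-- ===== CLAIM (what is proved, stated in full; the proofs are below) =====
def Claim_equal_search4last_verb : Prop := ∀ (pos_tagged : List (String × String)), Dom_search4last_verb pos_tagged → Spec_search4last_verb pos_tagged (search4last_verb pos_tagged)

-- ===== LEMMAS AND PROOFS =====

-- Invariant of A's fold: with the flag latched it filters nouns; unlatched, it first drops to the first verb.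
theorem pv_loop_eq (xs : List (String × String)) (acc : List (String × String)) (flag : Bool) :
    (xs.foldl
      (fun (st : List (String × String) × Bool) tag_tuple =>
        let flag := if tag_tuple.2 == "VERB" then true else st.2
        let nouns_list := if flag && (tag_tuple.2 == "NOUN") then st.1 ++ [tag_tuple] else st.1
        (nouns_list, flag))
      (acc, flag)).1
    = acc ++ (if flag then xs.filter (fun t => t.2 == "NOUN")
              else (xs.dropWhile (fun t => t.2 != "VERB")).filter (fun t => t.2 == "NOUN")) := by
  induction xs generalizing acc flag with
  | nil => simp
  | cons h t ih =>
    by_cases hv : h.2 = "VERB"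
    · cases flag <;>
      · have h1 := ih acc true
        simp at h1
        simpa [hv, List.dropWhile_cons, List.filter_cons,
          show ¬("VERB" = "NOUN") from by decide] using h1
    · by_cases hn : h.2 = "NOUN"
      · cases flag
        · have h1 := ih acc false
          simp at h1
          simpa [hv, hn, List.dropWhile_cons, List.filter_cons] using h1
        · have h1 := ih (acc ++ [h]) true
          simp at h1
          simpa [hv, hn, List.filter_cons] using h1
      · cases flag
        · have h1 := ih acc false
          simp at h1
          simpa [hv, hn, List.dropWhile_cons, List.filter_cons] using h1
        · have h1 := ih acc true
          simp at h1
          simpa [hv, hn, List.filter_cons] using h1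

-- ===== VERDICT (by name: the statement is the Claim_ definition above) =====
theorem search4last_verb_spec : Claim_equal_search4last_verb := by
  intro xs _
  unfold Spec_search4last_verb search4last_verb search4last_verb_alt
  rw [pv_loop_eq]
  simp
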